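-- pv_equiv track=rewrite | github.com/oliversulyok/challenges | python/advent-of-code-2021/day3/main.py | iterate_over
-- ===== SOURCE A (Python) =====
-- def iterate_over(array):
--     result = {}
--     for el in array:
--         for idx, value in enumerate(el):
--             if value in ['1', '0']:
--                 value = int(value)
--                 if idx not in result:
--                     result[idx] = [value]
--                 else:
--                     result[idx].append(value)
--     return result
-- ===== SOURCE B (Python) =====
-- def iterate_over(array):
--     idxs = [i for el in array for i, c in enumerate(el) if c in ('0', '1')]
--     return {i: [int(el[i]) for el in array if i < len(el) and el[i] in ('0', '1')]
--             for i in dict.fromkeys(idxs)}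
-- ===== Notes on version B (the rewrite author's own statement) =====
-- stated objective: simpler
-- what changed: A builds the dict row-major, appending each digit to a growing per-column list with an explicit membership branch; B discovers the key order once from the flattened digit indices and then extracts each whole column with a single column-major comprehension (two comprehensions, no incremental dict state).
import Mathlib
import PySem

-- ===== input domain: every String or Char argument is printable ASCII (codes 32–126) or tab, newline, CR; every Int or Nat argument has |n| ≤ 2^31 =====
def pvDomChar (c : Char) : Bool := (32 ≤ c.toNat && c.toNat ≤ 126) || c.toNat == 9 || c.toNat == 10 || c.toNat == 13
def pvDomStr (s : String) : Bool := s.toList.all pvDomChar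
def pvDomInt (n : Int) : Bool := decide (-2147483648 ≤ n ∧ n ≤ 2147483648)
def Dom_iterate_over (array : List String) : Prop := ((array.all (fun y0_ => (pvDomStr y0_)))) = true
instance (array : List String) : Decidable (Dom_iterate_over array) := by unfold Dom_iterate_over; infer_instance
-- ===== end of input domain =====

-- B groups the '0'/'1' digits by column in two comprehensions (key order discovered once,
-- each column extracted column-major) instead of A's row-major dict of growing lists;
-- objective: simpler (not measured faster).

-- ===== PORT A =====
-- row-major loop: for el in array: for idx, value in enumerate(el): …
def iterate_over (array : List String) : List (Int × List Int) :=
  (array.foldl (fun result el =>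
      (PySem.List.enumerate el.toList 0).foldl (fun result iv =>
        if iv.2 == '1' || iv.2 == '0' then
          let value : Int := (iv.2.toNat : Int) - 48   -- int(value); exact for '0'/'1'
          if result.contains iv.1 = false then          -- if idx not in result
            result.insert iv.1 [value]
          else
            result.modify iv.1 [] (fun xs => xs ++ [value])   -- result[idx].append(value)
        else result) result)
    PySem.Dict.empty).items

-- ===== PORT B =====
-- helper of B: the comprehension element for column i of row el
-- (int(el[i]) if i < len(el) and el[i] in ('0','1'), else nothing)
def pyColDigit (i : Int) (el : String) : Option Int :=
  if i < (el.toList.length : Int) then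
    let c := PySem.List.pyGetD el.toList i ' '
    if c == '0' || c == '1' then some ((c.toNat : Int) - 48) else none
  else none

-- idxs = [i for el in array for i, c in enumerate(el) if c in ('0','1')]
-- {i: [int(el[i]) for el in array if i < len(el) and el[i] in ('0','1')] for i in dict.fromkeys(idxs)}
def iterate_over_alt (array : List String) : List (Int × List Int) :=
  let idxs := array.flatMap (fun el =>
    (PySem.List.enumerate el.toList 0).filterMap (fun ic =>
      if ic.2 == '0' || ic.2 == '1' then some ic.1 else none))
  (PySem.List.dedup idxs).map (fun i => (i, array.filterMap (pyColDigit i)))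

-- ===== PRECONDITION & SPEC =====
def Spec_iterate_over (array : List String) (out : List (Int × List Int)) : Prop := out = iterate_over_alt array
instance (array : List String) (out : List (Int × List Int)) : Decidable (Spec_iterate_over array out) := by unfold Spec_iterate_over; infer_instance

-- ===== CLAIM (what is proved, stated in full; the proofs are below) =====
def Claim_equal_iterate_over : Prop := ∀ (array : List String), Dom_iterate_over array → Spec_iterate_over array (iterate_over array)

-- ===== LEMMAS AND PROOFS =====

-- proof-side vocabulary
def pvMStep (d : PySem.Dict Int (List Int)) (q : Int × Int) : PySem.Dict Int (List Int) :=
  d.modify q.1 [] (fun xs => xs ++ [q.2])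

def pvToPair (ic : Int × Char) : Option (Int × Int) :=
  if ic.2 == '1' || ic.2 == '0' then some (ic.1, (ic.2.toNat : Int) - 48) else none

def pvRowPairs (el : String) : List (Int × Int) :=
  (PySem.List.enumerate el.toList 0).filterMap pvToPair

def pvAllPairs (array : List String) : List (Int × Int) := array.flatMap pvRowPairs

-- A's loop body equals the uniform modify step (on non-digits it skips)
theorem pvStep_eq (d : PySem.Dict Int (List Int)) (ic : Int × Char) :
    (if ic.2 == '1' || ic.2 == '0' then
      let value : Int := (ic.2.toNat : Int) - 48
      if d.contains ic.1 = false then d.insert ic.1 [value]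
      else d.modify ic.1 [] (fun xs => xs ++ [value])
     else d)
    = ((pvToPair ic).toList.foldl pvMStep d) := by
  unfold pvToPair
  by_cases hb : (ic.2 == '1' || ic.2 == '0') = true
  · simp only [hb, if_pos, Option.toList_some, List.foldl_cons, List.foldl_nil]
    by_cases hc : d.contains ic.1 = false
    · simp only [hc, if_pos]
      show d.insert ic.1 [_] = d.modify ic.1 [] (fun xs => xs ++ [_])
      have h0 : d.getD ic.1 [] = [] := PySem.Dict.getD_of_not_contains d [] hc
      show d.insert ic.1 [_] = d.insert ic.1 (d.getD ic.1 [] ++ [_])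
      rw [h0]
      rfl
    · simp only [hc]
      rfl
  · simp [hb]

-- A's whole nested loop is one fold of pvMStep over pvAllPairs
theorem pvA_eq_fold (array : List String) :
    iterate_over array = ((pvAllPairs array).foldl pvMStep PySem.Dict.empty).items := by
  unfold iterate_over pvAllPairs
  rw [List.foldl_flatMap]
  have h : ∀ (d : PySem.Dict Int (List Int)) (el : String),
      (PySem.List.enumerate el.toList 0).foldl (fun result iv =>
        if iv.2 == '1' || iv.2 == '0' then
          let value : Int := (iv.2.toNat : Int) - 48
          if result.contains iv.1 = false then result.insert iv.1 [value]
          else result.modify iv.1 [] (fun xs => xs ++ [value])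
        else result) d
      = (pvRowPairs el).foldl pvMStep d := by
    intro d el
    unfold pvRowPairs
    rw [List.filterMap_eq_flatMap_toList, List.foldl_flatMap]
    have hf : (fun (result : PySem.Dict Int (List Int)) (iv : Int × Char) =>
        if iv.2 == '1' || iv.2 == '0' then
          let value : Int := (iv.2.toNat : Int) - 48
          if result.contains iv.1 = false then result.insert iv.1 [value]
          else result.modify iv.1 [] (fun xs => xs ++ [value])
        else result)
        = (fun (result : PySem.Dict Int (List Int)) (iv : Int × Char) =>
            (pvToPair iv).toList.foldl pvMStep result) :=
      funext fun d => funext fun ic => pvStep_eq d ic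
    rw [hf]
  rw [funext fun d => funext fun el => h d el]

-- keys of the folded dict, in order
theorem pvKeys_fold (array : List String) :
    ((pvAllPairs array).foldl pvMStep PySem.Dict.empty).keys
      = PySem.List.dedup ((pvAllPairs array).map Prod.fst) := by
  unfold pvMStep
  rw [PySem.Dict.keys_foldl_modify_key (pvAllPairs array) Prod.fst [] (fun d p => (· ++ [p.2]))]
  simp [PySem.List.dedup_eq_ofList]
  rfl

theorem pvNodupKeys_fold (array : List String) :
    ((pvAllPairs array).foldl pvMStep PySem.Dict.empty).keys.Nodup := by
  unfold pvMStep
  exact PySem.Dict.nodup_keys_foldl_modify_key (pvAllPairs array) Prod.fst []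
    (fun d p => (· ++ [p.2])) PySem.Dict.empty (by simp [PySem.Dict.keys_empty])

-- first components of pvAllPairs are B's idxs
theorem pvFst_allPairs (array : List String) :
    (pvAllPairs array).map Prod.fst
      = array.flatMap (fun el =>
          (PySem.List.enumerate el.toList 0).filterMap (fun ic =>
            if ic.2 == '0' || ic.2 == '1' then some ic.1 else none)) := by
  unfold pvAllPairs pvRowPairs
  rw [List.map_flatMap]
  congr 1
  funext el
  rw [List.map_filterMap]
  congr 1
  funext ic
  cases h1 : (ic.2 == '1') <;> cases h0 : (ic.2 == '0') <;> simp [pvToPair, h1, h0]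

-- value list of the folded dict at key k
theorem pvGetD_fold (array : List String) (k : Int) :
    ((pvAllPairs array).foldl pvMStep PySem.Dict.empty).getD k []
      = ((pvAllPairs array).filter (fun q => q.1 == k)).map (·.2) := by
  unfold pvMStep
  rw [PySem.Dict.getD_foldl_modify_append (pvAllPairs array) PySem.Dict.empty k]
  simp [PySem.Dict.getD_empty]

-- per-row core, generalized over the enumerate start
theorem pvFst_ge (cs : List Char) (t : Int) :
    ∀ q ∈ (PySem.List.enumerate cs t).filterMap pvToPair, t ≤ q.1 := by
  intro q hq
  rcases List.mem_filterMap.1 hq with ⟨ic, hic, htp⟩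
  rcases (PySem.List.mem_enumerate_iff _ _ _).1 hic with ⟨k, hk, rfl⟩
  unfold pvToPair at htp
  split at htp
  · cases htp
    simp
  · cases htp

-- shifting the start of the row by one past a non-matching head
theorem pvShift (c : Char) (cs : List Char) (s i : Int) (hsi : s ≠ i) :
    (if s + 1 ≤ i ∧ i - (s + 1) < (cs.length : Int)
          ∧ (cs.getD (i - (s + 1)).toNat ' ' == '1' || cs.getD (i - (s + 1)).toNat ' ' == '0')
      then [((cs.getD (i - (s + 1)).toNat ' ').toNat : Int) - 48] else [])
    = (if s ≤ i ∧ i - s < ((c :: cs).length : Int)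
          ∧ ((c :: cs).getD (i - s).toNat ' ' == '1' || (c :: cs).getD (i - s).toNat ' ' == '0')
      then [(((c :: cs).getD (i - s).toNat ' ').toNat : Int) - 48] else []) := by
  by_cases hle : s + 1 ≤ i
  · have h2 : (i - s).toNat = (i - (s + 1)).toNat + 1 := by omega
    rw [h2, List.getD_cons_succ]
    split_ifs with hA hB hB
    · rfl
    · exfalso
      obtain ⟨-, hlt, hbin⟩ := hA
      exact hB ⟨by omega, by simp only [List.length_cons]; push_cast; omega, hbin⟩
    · exfalso
      obtain ⟨-, hlt, hbin⟩ := hB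
      refine hA ⟨hle, ?_, hbin⟩
      simp only [List.length_cons] at hlt
      push_cast at hlt
      omega
    · rfl
  · rw [if_neg (by rintro ⟨h, -, -⟩; omega), if_neg (by rintro ⟨h, -, -⟩; omega)]

theorem pvRow_core (cs : List Char) (s i : Int) :
    (((PySem.List.enumerate cs s).filterMap pvToPair).filter (fun q => q.1 == i)).map (·.2)
      = if s ≤ i ∧ i - s < (cs.length : Int)
            ∧ (cs.getD (i - s).toNat ' ' == '1' || cs.getD (i - s).toNat ' ' == '0')
        then [((cs.getD (i - s).toNat ' ').toNat : Int) - 48] else [] := by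
  induction cs generalizing s with
  | nil =>
    rw [PySem.List.enumerate_nil]
    rw [if_neg]
    · rfl
    · rintro ⟨h1, h2, -⟩
      simp at h2
      omega
  | cons c cs ih =>
    rw [PySem.List.enumerate_cons, List.filterMap_cons]
    by_cases hb : (c == '1' || c == '0') = true
    · have hpt : pvToPair (s, c) = some (s, (c.toNat : Int) - 48) := by
        unfold pvToPair
        rw [if_pos hb]
      rw [hpt]
      by_cases hsi : s = i
      · subst hsi
        have hrest : ((PySem.List.enumerate cs (s + 1)).filterMap pvToPair).filter
            (fun q => q.1 == s) = [] := by
          rw [List.filter_eq_nil_iff]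
          intro q hq
          have := pvFst_ge cs (s + 1) q hq
          simp
          omega
        rw [List.filter_cons_of_pos (by simp), hrest]
        have hc0 : (s - s).toNat = 0 := by omega
        rw [if_pos ⟨le_refl s, by simp only [List.length_cons]; push_cast; omega,
          by rw [hc0, List.getD_cons_zero]; exact hb⟩]
        rw [hc0, List.getD_cons_zero]
        simp
      · rw [List.filter_cons_of_neg (by simp [hsi])]
        rw [ih (s + 1)]
        exact pvShift c cs s i hsi
    · have hpt : pvToPair (s, c) = none := by
        unfold pvToPair
        rw [if_neg hb]
      rw [hpt, ih (s + 1)]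
      by_cases hsi : s = i
      · subst hsi
        rw [if_neg (by rintro ⟨h, -, -⟩; omega), if_neg]
        rintro ⟨-, -, hbin⟩
        rw [show (s - s).toNat = 0 from by omega, List.getD_cons_zero] at hbin
        exact hb hbin
      · exact pvShift c cs s i hsi

-- the filtered row values are B's comprehension element
theorem pvPyGetD_nonneg (cs : List Char) (i : Int) (hi : 0 ≤ i) :
    PySem.List.pyGetD cs i ' ' = cs.getD i.toNat ' ' := by
  simp only [PySem.List.pyGetD, PySem.List.pyGet?, PySem.List.pyIdx?, hi, if_true]
  rw [List.getD_eq_getElem?_getD]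
  by_cases h : i < (cs.length : Int)
  · simp [h]
  · rw [if_neg h]
    have : cs[i.toNat]? = none := by
      rw [List.getElem?_eq_none]
      omega
    simp [this]

theorem pvRow_col (el : String) (i : Int) (hi : 0 ≤ i) :
    ((pvRowPairs el).filter (fun q => q.1 == i)).map (·.2) = (pyColDigit i el).toList := by
  unfold pvRowPairs pyColDigit
  rw [pvRow_core el.toList 0 i]
  by_cases hl : i < (el.toList.length : Int)
  · have hl2 : i < (el.length : Int) := by simpa using hl
    rw [pvPyGetD_nonneg el.toList i hi, if_pos hl]
    simp only [sub_zero]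
    cases h1 : (el.toList.getD i.toNat ' ' == '1') <;>
      cases h0 : (el.toList.getD i.toNat ' ' == '0') <;>
        simp_all
  · rw [if_neg hl]
    rw [if_neg]
    · rfl
    · rintro ⟨-, h2, -⟩
      omega

-- whole-array column equality
theorem pvCol_eq (array : List String) (i : Int) (hi : 0 ≤ i) :
    ((pvAllPairs array).filter (fun q => q.1 == i)).map (·.2)
      = array.filterMap (pyColDigit i) := by
  unfold pvAllPairs
  rw [List.filter_flatMap, List.map_flatMap, List.filterMap_eq_flatMap_toList]
  congr 1
  funext el
  exact pvRow_col el i hi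

-- every index produced is nonnegative
theorem pvFst_nonneg (array : List String) (i : Int)
    (h : i ∈ (pvAllPairs array).map Prod.fst) : 0 ≤ i := by
  rcases List.mem_map.1 h with ⟨q, hq, rfl⟩
  rcases List.mem_flatMap.1 hq with ⟨el, _, hm⟩
  rcases List.mem_filterMap.1 hm with ⟨ic, hic, htp⟩
  rcases (PySem.List.mem_enumerate_iff _ _ _).1 hic with ⟨k, hk, rfl⟩
  unfold pvToPair at htp
  split at htp
  · cases htp
    simp
  · cases htp

-- ===== VERDICT (by name: the statement is the Claim_ definition above) =====
theorem iterate_over_spec : Claim_equal_iterate_over := by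
  intro array _
  unfold Spec_iterate_over iterate_over_alt
  rw [pvA_eq_fold]
  rw [PySem.Dict.items_eq_map_keys _ (pvNodupKeys_fold array) []]
  rw [pvKeys_fold, pvFst_allPairs]
  apply List.map_congr_left
  intro k hk
  have hk' : k ∈ (pvAllPairs array).map Prod.fst := by
    rw [pvFst_allPairs]; simpa using hk
  have h0 : 0 ≤ k := pvFst_nonneg array k hk'
  rw [pvGetD_fold, pvCol_eq array k h0]
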